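-- pv_equiv track=rewrite | github.com/dxf2026/ASSIP25-NL-to-ERE | ere_to_re.py | use_anonymization
-- ===== SOURCE A (Python) =====
-- def use_anonymization(ere:str, anonymization_map:dict):
--     '''
--     Takes an ere and a anonymization map as input.
--     Uses the mapping generated from create_anonymization to replace the events
--     with single unique characters.
--     If an event in this ere is not in the anonymization_map, it replaces them starting with the lowercase alphabet.
--     '''
--     ere += " "
--
--     curr_event = ""
--     new_ere = ""
--     curr_replacement = "a"
--     '''
--     We still need the curr_replacement string because there could be events found in this ERE that were not inside the previous ERE
--     We start at "a" instead of "A" to differentiate.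
--     '''
--
--     valid_char = [*range(ord('a'), ord('z') + 1), *range(ord('0'), ord('9') + 1), ord("_")]
--     for c in ere:
--         if ord(c) in valid_char:
--             curr_event += c
--         else:
--             if curr_event:
--                 if curr_event not in anonymization_map: # If the event was not in the previous ERE, we perform the same steps as earlier.
--                     anonymization_map[curr_event] = curr_replacement # 1. We add the new character into the anonymization_map
--                     new_ere += curr_replacement # 2. We add the character to the new ERE
--                     curr_replacement = chr(ord(curr_replacement)+1) # 3. We increment the current replacement character
--                 else: # If the event has been seen before, we add the replacement character to the new ERE
--                     new_ere += anonymization_map[curr_event]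
--
--                 curr_event = ""
--             new_ere += c
--     return new_ere # We return only the new_ere
-- ===== SOURCE B (Python) =====
-- def use_anonymization(ere: str, anonymization_map: dict):
--     """Run-tokenizing two-pointer rewrite: scans whole [a-z0-9_] runs with an
--     inner while and slicing instead of A's per-character state machine, and
--     joins a list instead of string concatenation. Return value and the
--     mutation of anonymization_map are identical to A's."""
--     s = ere + " "
--     n = len(s)
--     out = []
--     rep = "a"
--     i = 0
--     while i < n:
--         c = s[i]
--         if c == "_" or "a" <= c <= "z" or "0" <= c <= "9":
--             j = i + 1
--             # safe: s ends with " ", a separator, so j stays < n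
--             while s[j] == "_" or "a" <= s[j] <= "z" or "0" <= s[j] <= "9":
--                 j += 1
--             word = s[i:j]
--             if word in anonymization_map:
--                 out.append(anonymization_map[word])
--             else:
--                 anonymization_map[word] = rep
--                 out.append(rep)
--                 rep = chr(ord(rep) + 1)
--             i = j
--         else:
--             out.append(c)
--             i += 1
--     return "".join(out)
-- ===== Notes on version B (the rewrite author's own statement) =====
-- stated objective: alternative
-- what changed: Replaces A's per-character state machine (accumulating curr_event via string concatenation) with a run-tokenizing two-pointer scan: an inner while consumes each whole [a-z0-9_] run at once via slicing, pieces are collected in a list and joined once; same map mutation and trailing-space behaviour.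
import Mathlib
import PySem

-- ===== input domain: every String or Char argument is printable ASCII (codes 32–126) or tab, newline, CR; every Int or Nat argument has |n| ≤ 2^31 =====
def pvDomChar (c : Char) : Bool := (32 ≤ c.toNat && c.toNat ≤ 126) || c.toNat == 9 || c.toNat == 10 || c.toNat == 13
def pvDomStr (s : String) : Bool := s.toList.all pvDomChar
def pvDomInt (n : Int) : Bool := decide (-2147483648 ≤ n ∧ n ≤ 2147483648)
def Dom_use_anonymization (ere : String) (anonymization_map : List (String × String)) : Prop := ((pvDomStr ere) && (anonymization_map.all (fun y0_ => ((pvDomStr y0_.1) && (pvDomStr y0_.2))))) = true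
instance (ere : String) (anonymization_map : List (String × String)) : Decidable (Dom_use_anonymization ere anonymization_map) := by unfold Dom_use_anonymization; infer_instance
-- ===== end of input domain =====

-- B replaces A's per-character state machine with a run-tokenizing two-pointer scan (objective:
-- alternative). The equivalence proved here is about the RETURN value; both programs also perform
-- the same in-place insertions into anonymization_map.

-- ===== PORT A =====
-- valid_char = [*range(ord('a'), ord('z')+1), *range(ord('0'), ord('9')+1), ord('_')]
def uaValid : List Int :=
  PySem.List.pyRange 97 123 1 ++ PySem.List.pyRange 48 58 1 ++ [(95 : Int)]

-- ord(c) in valid_char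
def uaValidTest (c : Char) : Bool := uaValid.contains ((c.toNat : Int))

-- the for-loop over ere+" " with state (curr_event, new_ere, curr_replacement, map)
def uaLoopA : List Char → List Char → List Char → Char → PySem.Dict String String → List Char
  | [], _, acc, _, _ => acc
  | c :: rest, cur, acc, rep, m =>
    if uaValidTest c then
      uaLoopA rest (cur ++ [c]) acc rep m
    else if cur ≠ [] then
      match PySem.Dict.get? m (String.ofList cur) with
      | none =>
          uaLoopA rest [] (acc ++ [rep] ++ [c]) (Char.ofNat (rep.toNat + 1))
            (PySem.Dict.insert m (String.ofList cur) (String.ofList [rep]))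
      | some v => uaLoopA rest [] (acc ++ v.toList ++ [c]) rep m
    else uaLoopA rest cur (acc ++ [c]) rep m

def use_anonymization (ere : String) (anonymization_map : List (String × String)) : String :=
  String.ofList (uaLoopA (ere.toList ++ [' ']) [] [] 'a' (PySem.Dict.mk anonymization_map))

-- ===== PORT B =====
-- c == "_" or "a" <= c <= "z" or "0" <= c <= "9"   (char range comparison via codes)
def uaIsEvent (c : Char) : Bool :=
  c = '_' || (97 ≤ c.toNat && c.toNat ≤ 122) || (48 ≤ c.toNat && c.toNat ≤ 57)

-- the inner while: consume the run s[i:j] and return (run, remaining suffix)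
def uaTakeRun : List Char → List Char × List Char
  | [] => ([], [])
  | c :: rest =>
    if uaIsEvent c then ((c :: (uaTakeRun rest).1), (uaTakeRun rest).2)
    else ([], c :: rest)

lemma uaTakeRun_len : ∀ s : List Char, (uaTakeRun s).2.length ≤ s.length := by
  intro s
  induction s with
  | nil => simp [uaTakeRun]
  | cons c rest ih =>
    by_cases h : uaIsEvent c
    · simp [uaTakeRun, h]; omega
    · simp [uaTakeRun, h]

-- the outer while over s = ere+" " with state (map, rep, out)
def uaLoopB : List Char → PySem.Dict String String → Char → List Char → List Char
  | [], _, _, acc => acc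
  | c :: rest, m, rep, acc =>
    if uaIsEvent c then
      match PySem.Dict.get? m (String.ofList (c :: (uaTakeRun rest).1)) with
      | some v => uaLoopB (uaTakeRun rest).2 m rep (acc ++ v.toList)
      | none =>
          uaLoopB (uaTakeRun rest).2
            (PySem.Dict.insert m (String.ofList (c :: (uaTakeRun rest).1)) (String.ofList [rep]))
            (Char.ofNat (rep.toNat + 1)) (acc ++ [rep])
    else uaLoopB rest m rep (acc ++ [c])
termination_by s => s.length
decreasing_by
  all_goals simp
  all_goals exact uaTakeRun_len rest

def use_anonymization_alt (ere : String) (anonymization_map : List (String × String)) : String :=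
  String.ofList (uaLoopB (ere.toList ++ [' ']) (PySem.Dict.mk anonymization_map) 'a' [])

-- ===== PRECONDITION & SPEC =====
def Spec_use_anonymization (ere : String) (anonymization_map : List (String × String)) (out : String) : Prop := out = use_anonymization_alt ere anonymization_map
instance (ere : String) (anonymization_map : List (String × String)) (out : String) : Decidable (Spec_use_anonymization ere anonymization_map out) := by unfold Spec_use_anonymization; infer_instance

-- ===== CLAIM (what is proved, stated in full; the proofs are below) =====
def Claim_equal_use_anonymization : Prop := ∀ (ere : String) (anonymization_map : List (String × String)), Dom_use_anonymization ere anonymization_map → Spec_use_anonymization ere anonymization_map (use_anonymization ere anonymization_map)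

-- ===== LEMMAS AND PROOFS =====

-- A's ord-list membership test and B's range-comparison test agree on every character
lemma ua_valid_eq (c : Char) : uaValidTest c = uaIsEvent c := by
  have h : uaValid = ([97, 98, 99, 100, 101, 102, 103, 104, 105, 106, 107, 108, 109, 110,
      111, 112, 113, 114, 115, 116, 117, 118, 119, 120, 121, 122, 48, 49, 50, 51, 52, 53,
      54, 55, 56, 57, 95] : List Int) := by decide
  have h95 : (c = '_') ↔ (c.toNat = 95) := by
    rw [Char.ext_iff, ← UInt32.toNat_inj]
    exact Iff.rfl
  rw [Bool.eq_iff_iff, uaValidTest, h]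
  simp only [List.contains_eq_any_beq, List.any_cons, List.any_nil, Bool.or_eq_true,
    beq_iff_eq, uaIsEvent, Bool.and_eq_true, decide_eq_true_eq, h95, Bool.false_eq_true,
    or_false]
  omega

-- combined invariant: main (A at a run boundary = B) and aux (A's pending curr_event cur equals
-- the start of B's current word), over suffixes whose last character is a separator
lemma ua_combined : ∀ n : Nat, ∀ s : List Char, s.length ≤ n →
    uaIsEvent (s.getLastD ' ') = false →
    ((∀ acc rep m, uaLoopA s [] acc rep m = uaLoopB s m rep acc) ∧
     (∀ cur acc rep m, cur ≠ [] → s ≠ [] →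
        uaLoopA s cur acc rep m =
          match PySem.Dict.get? m (String.ofList (cur ++ (uaTakeRun s).1)) with
          | none =>
              uaLoopB (uaTakeRun s).2
                (PySem.Dict.insert m (String.ofList (cur ++ (uaTakeRun s).1)) (String.ofList [rep]))
                (Char.ofNat (rep.toNat + 1)) (acc ++ [rep])
          | some v => uaLoopB (uaTakeRun s).2 m rep (acc ++ v.toList))) := by
  intro n
  induction n with
  | zero =>
    intro s hs _
    have hnil : s = [] := List.length_eq_zero_iff.mp (Nat.le_zero.mp hs)
    subst hnil
    exact ⟨fun acc rep m => by rw [uaLoopA, uaLoopB], fun _ _ _ _ _ hne => absurd rfl hne⟩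
  | succ n ih =>
    intro s hs hlast
    cases s with
    | nil => exact ⟨fun acc rep m => by rw [uaLoopA, uaLoopB], fun _ _ _ _ _ hne => absurd rfl hne⟩
    | cons c rest =>
      have hrestlen : rest.length ≤ n := by simpa using hs
      have hlastrest : uaIsEvent (rest.getLastD ' ') = false := by
        cases rest with
        | nil => decide
        | cons d tl => simpa using hlast
      have IH := ih rest hrestlen hlastrest
      constructor
      · -- main part
        intro acc rep m
        by_cases hc : uaIsEvent c
        · have hrne : rest ≠ [] := by
            intro h; subst h; simp [List.getLastD] at hlast; rw [hlast] at hc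
            exact Bool.noConfusion hc
          have step : uaLoopA (c :: rest) [] acc rep m = uaLoopA rest [c] acc rep m := by
            simp [uaLoopA, ua_valid_eq, hc]
          rw [step, IH.2 [c] acc rep m (by simp) hrne]
          conv_rhs => rw [uaLoopB]
          simp only [hc, if_true, List.singleton_append]
          cases PySem.Dict.get? m (String.ofList (c :: (uaTakeRun rest).1)) <;> rfl
        · have stepA : uaLoopA (c :: rest) [] acc rep m = uaLoopA rest [] (acc ++ [c]) rep m := by
            simp [uaLoopA, ua_valid_eq, hc]
          have stepB : uaLoopB (c :: rest) m rep acc = uaLoopB rest m rep (acc ++ [c]) := by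
            rw [uaLoopB]; simp [hc]
          rw [stepA, stepB, IH.1]
      · -- aux part
        intro cur acc rep m hcur _
        by_cases hc : uaIsEvent c
        · have hrne : rest ≠ [] := by
            intro h; subst h; simp [List.getLastD] at hlast; rw [hlast] at hc
            exact Bool.noConfusion hc
          have step : uaLoopA (c :: rest) cur acc rep m = uaLoopA rest (cur ++ [c]) acc rep m := by
            simp [uaLoopA, ua_valid_eq, hc]
          rw [step, IH.2 (cur ++ [c]) acc rep m (by simp) hrne]
          simp [uaTakeRun, hc]
        · have hA : uaLoopA (c :: rest) cur acc rep m =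
              match PySem.Dict.get? m (String.ofList cur) with
              | none =>
                  uaLoopA rest [] (acc ++ [rep] ++ [c]) (Char.ofNat (rep.toNat + 1))
                    (PySem.Dict.insert m (String.ofList cur) (String.ofList [rep]))
              | some v => uaLoopA rest [] (acc ++ v.toList ++ [c]) rep m := by
            rw [uaLoopA]
            simp [ua_valid_eq, hc, hcur]
          have htr : uaTakeRun (c :: rest) = ([], c :: rest) := by simp [uaTakeRun, hc]
          rw [hA, htr]
          simp only [List.append_nil]
          cases hget : PySem.Dict.get? m (String.ofList cur) with
          | none =>
            dsimp only
            have stepB : uaLoopB (c :: rest)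
                (PySem.Dict.insert m (String.ofList cur) (String.ofList [rep]))
                (Char.ofNat (rep.toNat + 1)) (acc ++ [rep]) =
                uaLoopB rest (PySem.Dict.insert m (String.ofList cur) (String.ofList [rep]))
                  (Char.ofNat (rep.toNat + 1)) (acc ++ [rep] ++ [c]) := by
              rw [uaLoopB]; simp [hc]
            rw [stepB, IH.1]
          | some v =>
            dsimp only
            have stepB : uaLoopB (c :: rest) m rep (acc ++ v.toList) =
                uaLoopB rest m rep (acc ++ v.toList ++ [c]) := by
              rw [uaLoopB]; simp [hc]
            rw [stepB, IH.1]

-- ===== VERDICT (by name: the statement is the Claim_ definition above) =====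
theorem use_anonymization_spec : Claim_equal_use_anonymization := by
  intro ere m _
  unfold Spec_use_anonymization use_anonymization use_anonymization_alt
  have hlast : uaIsEvent ((ere.toList ++ [' ']).getLastD ' ') = false := by
    rw [List.getLastD_concat]; decide
  rw [(ua_combined (ere.toList ++ [' ']).length (ere.toList ++ [' ']) le_rfl hlast).1]
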